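-- pv_equiv track=rewrite | github.com/mecchih/Projeto2-Henrique-Certo | funcoes.py | calcula_pontos_quina
-- ===== SOURCE A (Python) =====
-- def calcula_pontos_quina(lista_inteiros):
--     tem = False
--     for numero in lista_inteiros:
--         if tem == True:
--             break
--         contagem = 0
--         for i in range(len(lista_inteiros)):
--             if lista_inteiros[i] == numero:
--                 contagem +=1
--             if contagem >= 5:
--                 tem = True
--     if tem == True:
--         return 50
--     else:
--         return 0
-- ===== SOURCE B (Python) =====
-- def calcula_pontos_quina(lista_inteiros):
--     contagens = {}
--     for n in lista_inteiros:
--         c = contagens.get(n, 0) + 1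
--         contagens[n] = c
--         if c >= 5:
--             return 50
--     return 0
-- ===== Notes on version B (the rewrite author's own statement) =====
-- stated objective: faster
-- what changed: Replaces the nested full-list rescan per element with a single pass maintaining a dict of running counts, returning 50 as soon as any count reaches 5.
import Mathlib
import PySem

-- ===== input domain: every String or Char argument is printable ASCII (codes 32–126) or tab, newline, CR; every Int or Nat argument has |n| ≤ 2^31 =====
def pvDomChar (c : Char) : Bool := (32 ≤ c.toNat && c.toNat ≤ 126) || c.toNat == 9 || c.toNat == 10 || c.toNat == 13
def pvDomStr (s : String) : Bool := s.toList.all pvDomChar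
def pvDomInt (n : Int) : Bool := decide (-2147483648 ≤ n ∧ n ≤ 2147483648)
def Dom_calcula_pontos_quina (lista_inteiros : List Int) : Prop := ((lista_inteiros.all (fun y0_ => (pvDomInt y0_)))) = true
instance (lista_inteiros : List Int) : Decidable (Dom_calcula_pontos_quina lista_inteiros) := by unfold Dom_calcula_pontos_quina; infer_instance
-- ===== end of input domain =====

-- B replaces A's nested full-list rescan per element with one linear pass over a dict of running
-- counts, returning 50 as soon as any count reaches 5 (objective: faster).

-- ===== PORT A =====
-- the 'break' is modelled by skipping the remaining iterations once tem is true (value-equivalent)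
def calcula_pontos_quina (lista_inteiros : List Int) : Int :=
  let tem := lista_inteiros.foldl (fun tem numero =>
    if tem = true then tem
    else
      ((PySem.List.pyRange 0 (lista_inteiros.length : Int) 1).foldl
        (fun (s : Int × Bool) i =>
          let contagem := if PySem.List.pyGetD lista_inteiros i 0 == numero then s.1 + 1 else s.1
          (contagem, if 5 ≤ contagem then true else s.2))
        ((0 : Int), tem)).2) false
  if tem = true then 50 else 0

-- ===== PORT B =====
def quinaLoop (contagens : PySem.Dict Int Int) : List Int → Int
  | [] => 0
  | n :: rest =>
      let c := contagens.getD n 0 + 1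
      let contagens' := contagens.insert n c
      if 5 ≤ c then 50 else quinaLoop contagens' rest

def calcula_pontos_quina_alt (lista_inteiros : List Int) : Int :=
  quinaLoop PySem.Dict.empty lista_inteiros

-- ===== PRECONDITION & SPEC =====
def Spec_calcula_pontos_quina (lista_inteiros : List Int) (out : Int) : Prop := out = calcula_pontos_quina_alt lista_inteiros
instance (lista_inteiros : List Int) (out : Int) : Decidable (Spec_calcula_pontos_quina lista_inteiros out) := by unfold Spec_calcula_pontos_quina; infer_instance

-- ===== CLAIM (what is proved, stated in full; the proofs are below) =====
def Claim_equal_calcula_pontos_quina : Prop := ∀ (lista_inteiros : List Int), Dom_calcula_pontos_quina lista_inteiros → Spec_calcula_pontos_quina lista_inteiros (calcula_pontos_quina lista_inteiros)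

-- ===== LEMMAS AND PROOFS =====

-- the flag update of one outer step, at the Bool level
theorem quina_flag_step (b : Bool) (P Q R : Prop) [Decidable P] [Decidable Q] [Decidable R]
    (h : P ∨ Q ↔ R) : ((if P then true else b) || decide Q) = (b || decide R) := by
  cases b
  · by_cases hp : P <;> simp [hp, ← h]
  · simp

-- A's inner loop: final flag = old flag OR "the scanned list is nonempty and c plus its count of numero reaches 5"
theorem quina_inner (numero : Int) (xs : List Int) :
    ∀ (c : Int) (tem : Bool),
      (xs.foldl (fun (s : Int × Bool) x =>
          let contagem := if x == numero then s.1 + 1 else s.1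
          (contagem, if 5 ≤ contagem then true else s.2)) (c, tem)).2
      = (tem || decide (xs ≠ [] ∧ 5 ≤ c + (xs.count numero : Int))) := by
  induction xs with
  | nil => intro c tem; simp
  | cons x xs ih =>
    intro c tem
    simp only [List.foldl_cons]
    rw [ih]
    by_cases hx : x = numero
    · subst hx
      have hc : (0 : Int) ≤ (List.count x xs : Int) := by positivity
      simp only [BEq.rfl, if_true, List.count_cons_self]
      apply quina_flag_step
      constructor
      · rintro (h | ⟨-, h⟩) <;> exact ⟨by simp, by push_cast at *; omega⟩
      · rintro ⟨-, h⟩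
        rcases eq_or_ne xs [] with rfl | hxs
        · left; simp at h ⊢; omega
        · right; exact ⟨hxs, by push_cast at *; omega⟩
    · have hbe : (x == numero) = false := by simp [hx]
      have hcc : List.count numero (x :: xs) = List.count numero xs := by simp [hx]
      have hc : (0 : Int) ≤ (List.count numero xs : Int) := by positivity
      simp only [hbe, Bool.false_eq_true, if_false, hcc]
      apply quina_flag_step
      constructor
      · rintro (h | ⟨-, h⟩) <;> exact ⟨by simp, by push_cast at *; omega⟩
      · rintro ⟨-, h⟩
        rcases eq_or_ne xs [] with rfl | hxs
        · left; simp at h ⊢; omega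
        · right; exact ⟨hxs, by push_cast at *; omega⟩

-- characterization of A: 50 iff some element occurs at least 5 times
theorem quina_A_char (l : List Int) :
    calcula_pontos_quina l
      = (if l.any (fun x => decide (5 ≤ (l.count x : Int))) then 50 else 0) := by
  have hstep : ∀ (tem : Bool) (numero : Int), numero ∈ l →
      (if tem = true then tem
       else ((PySem.List.pyRange 0 (l.length : Int) 1).foldl
         (fun (s : Int × Bool) i =>
           let contagem := if PySem.List.pyGetD l i 0 == numero then s.1 + 1 else s.1
           (contagem, if 5 ≤ contagem then true else s.2)) ((0 : Int), tem)).2)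
      = (if decide (5 ≤ (l.count numero : Int)) then true else tem) := by
    intro tem numero hmem
    have hne : l ≠ [] := List.ne_nil_of_mem hmem
    rw [PySem.List.foldl_pyRange_zero_pyGetD' l 0
        (fun (s : Int × Bool) x =>
           let contagem := if x == numero then s.1 + 1 else s.1
           (contagem, if 5 ≤ contagem then true else s.2)) ((0 : Int), tem),
        quina_inner numero l 0 tem]
    cases tem
    · simp [hne]
    · simp
  have key : l.foldl (fun tem numero =>
      if tem = true then tem
      else ((PySem.List.pyRange 0 (l.length : Int) 1).foldl
        (fun (s : Int × Bool) i =>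
          let contagem := if PySem.List.pyGetD l i 0 == numero then s.1 + 1 else s.1
          (contagem, if 5 ≤ contagem then true else s.2)) ((0 : Int), tem)).2) false
      = l.any (fun x => decide (5 ≤ (l.count x : Int))) := by
    rw [PySem.List.foldl_congr_mem l _
          (fun tem numero => if decide (5 ≤ (l.count numero : Int)) then true else tem)
          false hstep,
        PySem.List.foldl_if_true_eq (fun x => decide (5 ≤ (l.count x : Int))) l false]
    simp
  simp only [calcula_pontos_quina, key]

-- B's loop: 50 iff some element's stored count plus its remaining occurrences reaches 5
theorem quina_B_char (l : List Int) :
    ∀ d : PySem.Dict Int Int,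
      quinaLoop d l
        = (if l.any (fun x => decide (5 ≤ d.getD x 0 + (l.count x : Int))) then 50 else 0) := by
  induction l with
  | nil => intro d; simp [quinaLoop]
  | cons n rest ih =>
    intro d
    simp only [quinaLoop]
    by_cases h5 : 5 ≤ d.getD n 0 + 1
    · have hmem : (n :: rest).any (fun x => decide (5 ≤ d.getD x 0 + ((n :: rest).count x : Int))) = true := by
        refine List.any_eq_true.2 ⟨n, List.mem_cons_self, ?_⟩
        have : (0 : Int) ≤ (rest.count n : Int) := by positivity
        simp only [List.count_cons_self, decide_eq_true_eq]
        push_cast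
        omega
      simp [h5, hmem]
    · rw [if_neg h5, ih]
      have hfun : (fun x => decide (5 ≤ (d.insert n (d.getD n 0 + 1)).getD x 0 + (rest.count x : Int)))
          = (fun x => decide (5 ≤ d.getD x 0 + ((n :: rest).count x : Int))) := by
        funext x
        rw [PySem.Dict.getD_insert]
        by_cases hx : x = n
        · subst hx
          simp only [List.count_cons_self, decide_eq_decide]
          push_cast
          omega
        · have hcc : List.count x (n :: rest) = List.count x rest := by simp [Ne.symm hx]
          simp [hx, hcc]
      rw [hfun]
      simp only [List.any_cons]
      by_cases hfn : 5 ≤ d.getD n 0 + ((n :: rest).count n : Int)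
      · have hcnt : 0 < rest.count n := by
          simp only [List.count_cons_self] at hfn
          push_cast at hfn
          omega
        have hmem : n ∈ rest := List.count_pos_iff.mp hcnt
        have hany : rest.any (fun x => decide (5 ≤ d.getD x 0 + ((n :: rest).count x : Int))) = true :=
          List.any_eq_true.2 ⟨n, hmem, decide_eq_true hfn⟩
        simp [hany]
      · have hfn' : ¬ (5 ≤ d.getD n 0 + ((rest.count n : Int) + 1)) := by
          simp only [List.count_cons_self] at hfn
          push_cast at hfn ⊢
          omega
        simp [hfn']

-- ===== VERDICT (by name: the statement is the Claim_ definition above) =====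
theorem calcula_pontos_quina_spec : Claim_equal_calcula_pontos_quina := by
  intro l _
  unfold Spec_calcula_pontos_quina calcula_pontos_quina_alt
  rw [quina_A_char, quina_B_char]
  simp [PySem.Dict.getD_empty]
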